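-- pv_equiv track=rewrite | github.com/xKimChip/searchengine | retrieve_query.py | parse_queries
-- ===== SOURCE A (Python) =====
-- token = str
--
-- def parse_queries(query_list: list[token]) -> list[list[token]]:
--     result: list[list[token]] = list()
--     curr_query_list: list[token] = list()
--     for query in query_list.split():
--         match query:
--             case 'AND':
--                 continue
--             case 'OR':
--                 result.append(curr_query_list)
--                 curr_query_list = list()
--             case _:
--                 curr_query_list.append(query.lower())
--             # this should be altered when/if we take positioning into account
--             # currently any phrase together is still just two and statements
--
--     result.append(curr_query_list)
--
--     # if query is AND, skip and keep appending to the same list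
--     # if query is OR, append curr_query_list to result list and then 0 out curr_query_list
--     # go next
--     # else query is regular query, keep appending
--
--     return result
-- ===== SOURCE B (Python) =====
-- token = str
--
-- def _segments(words: list[token]) -> list[list[token]]:
--     # split the word list into segments delimited by the exact token 'OR',
--     # preserving empty segments (recursion on the list structure)
--     if not words:
--         return [[]]
--     rest = _segments(words[1:])
--     if words[0] == 'OR':
--         return [[]] + rest
--     rest[0] = [words[0]] + rest[0]
--     return rest
--
-- def parse_queries(query_list: list[token]) -> list[list[token]]:
--     return [[w.lower() for w in seg if w != 'AND'] for seg in _segments(query_list.split())]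
-- ===== Notes on version B (the rewrite author's own statement) =====
-- stated objective: alternative
-- what changed: A's single interleaved pass (accumulator + result list, lowering/AND-filtering while scanning) is replaced by a two-phase decomposition: recursively split the word list into OR-delimited segments (empty segments preserved), then map each segment through an AND-filtering lowercase transform.
import Mathlib
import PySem

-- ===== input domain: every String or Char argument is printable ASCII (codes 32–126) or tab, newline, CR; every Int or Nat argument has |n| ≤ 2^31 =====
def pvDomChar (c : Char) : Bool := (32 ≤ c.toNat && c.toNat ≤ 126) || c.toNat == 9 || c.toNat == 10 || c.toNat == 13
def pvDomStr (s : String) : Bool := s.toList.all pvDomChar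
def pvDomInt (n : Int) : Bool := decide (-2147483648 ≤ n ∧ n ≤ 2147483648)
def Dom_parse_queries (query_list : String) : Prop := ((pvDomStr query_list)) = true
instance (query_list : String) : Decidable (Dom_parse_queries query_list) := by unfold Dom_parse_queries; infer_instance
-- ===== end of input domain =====

-- B replaces A's single interleaved pass by a two-phase decomposition (OR-segmentation, then per-segment AND-filter + lowercase); same cost, alternative structure.


-- ===== PORT A =====
-- one fold over the words, state = (result, curr_query_list); branches in A's order
def parse_queries (query_list : String) : List (List String) :=
  let st := (PySem.Str.split₀ query_list).foldl
    (fun (st : List (List String) × List String) (query : String) =>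
      if query = "AND" then st
      else if query = "OR" then (st.1 ++ [st.2], [])
      else (st.1, st.2 ++ [PySem.Str.lower query]))
    ([], [])
  st.1 ++ [st.2]

-- ===== PORT B =====
-- recursive OR-segmentation of the word list (empty segments preserved)
def pvSegments : List String → List (List String)
  | [] => [[]]
  | w :: ws =>
    let rest := pvSegments ws
    if w = "OR" then [] :: rest
    else match rest with
      | s :: t => (w :: s) :: t
      | [] => [[w]]   -- unreachable: pvSegments never returns []

def parse_queries_alt (query_list : String) : List (List String) :=
  (pvSegments (PySem.Str.split₀ query_list)).map
    (fun seg => (seg.filter (fun w => w ≠ "AND")).map PySem.Str.lower)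

-- ===== PRECONDITION & SPEC =====
def Spec_parse_queries (query_list : String) (out : List (List String)) : Prop := out = parse_queries_alt query_list
instance (query_list : String) (out : List (List String)) : Decidable (Spec_parse_queries query_list out) := by unfold Spec_parse_queries; infer_instance

-- ===== CLAIM (what is proved, stated in full; the proofs are below) =====
def Claim_equal_parse_queries : Prop := ∀ (query_list : String), Dom_parse_queries query_list → Spec_parse_queries query_list (parse_queries query_list)

-- ===== LEMMAS AND PROOFS =====

theorem pvSegments_ne_nil (ws : List String) : pvSegments ws ≠ [] := by
  cases ws with
  | nil => simp [pvSegments]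
  | cons w ws =>
    simp only [pvSegments]
    split
    · simp
    · cases h : pvSegments ws with
      | nil => simp
      | cons s t => simp

-- the transform applied to each segment in B
def pvTf (seg : List String) : List String :=
  (seg.filter (fun w => w ≠ "AND")).map PySem.Str.lower

theorem pv_key (ws : List String) (res : List (List String)) (cur : List String) :
    (ws.foldl
      (fun (st : List (List String) × List String) (query : String) =>
        if query = "AND" then st
        else if query = "OR" then (st.1 ++ [st.2], [])
        else (st.1, st.2 ++ [PySem.Str.lower query]))
      (res, cur)).1
    ++ [(ws.foldl
      (fun (st : List (List String) × List String) (query : String) =>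
        if query = "AND" then st
        else if query = "OR" then (st.1 ++ [st.2], [])
        else (st.1, st.2 ++ [PySem.Str.lower query]))
      (res, cur)).2]
    = res ++ ((pvSegments ws).map pvTf).modifyHead (fun s => cur ++ s) := by
  induction ws generalizing res cur with
  | nil => simp [pvSegments, pvTf]
  | cons w ws ih =>
    by_cases hA : w = "AND"
    · subst hA
      simp only [List.foldl_cons, reduceIte, pvSegments]
      cases h : pvSegments ws with
      | nil => exact absurd h (pvSegments_ne_nil ws)
      | cons s t =>
        have := ih res cur
        rw [h] at this
        simpa [pvTf, h] using this
    · by_cases hO : w = "OR"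
      · subst hO
        simp only [List.foldl_cons, if_neg hA, reduceIte, pvSegments]
        have := ih (res ++ [cur]) []
        cases h : pvSegments ws with
        | nil => exact absurd h (pvSegments_ne_nil ws)
        | cons s t =>
          rw [h] at this
          simp only [List.map_cons, List.modifyHead_cons, List.nil_append] at this ⊢
          rw [this]
          simp [pvTf]
      · simp only [List.foldl_cons, if_neg hA, if_neg hO, pvSegments]
        cases h : pvSegments ws with
        | nil => exact absurd h (pvSegments_ne_nil ws)
        | cons s t =>
          have := ih res (cur ++ [PySem.Str.lower w])
          rw [h] at this
          simp only [List.map_cons, List.modifyHead_cons] at this ⊢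
          rw [this]
          simp [pvTf, hA]

-- ===== VERDICT (by name: the statement is the Claim_ definition above) =====
theorem parse_queries_spec : Claim_equal_parse_queries := by
  intro q _
  show parse_queries q = parse_queries_alt q
  unfold parse_queries parse_queries_alt
  have := pv_key (PySem.Str.split₀ q) [] []
  simp only [List.nil_append] at this
  rw [this]
  cases h : pvSegments (PySem.Str.split₀ q) with
  | nil => exact absurd h (pvSegments_ne_nil _)
  | cons s t => simp [pvTf]
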